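-- pv_equiv track=rewrite | github.com/cal-itp/data-analyses | open_data/download_vehicle_positions.py | determine_batches
-- ===== SOURCE A (Python) =====
-- def determine_batches(rt_names: list) -> dict:
--     #https://stackoverflow.com/questions/4843158/how-to-check-if-a-string-is-a-substring-of-items-in-a-list-of-strings
--     large_operator_names = [
--         "LA Metro Bus",
--         "LA Metro Rail",
--         "AC Transit",
--         "Muni"
--     ]
--
--     bay_area_names = [
--         "Bay Area 511"
--     ]
--
--     # If any of the large operator name substring is
--     # found in our list of names, grab those
--     # be flexible bc "Vehicle Positions" and "VehiclePositions" present
--     matching = [i for i in rt_names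
--                 if any(name in i for name in large_operator_names)]
--
--     remaining_bay_area = [i for i in rt_names
--                           if any(name in i for name in bay_area_names) and
--                           i not in matching
--                          ]
--     remaining = [i for i in rt_names if
--                  i not in matching and i not in remaining_bay_area]
--
--     # Batch large operators together and run remaining in 2nd query
--     batch_dict = {}
--
--     batch_dict[0] = matching
--     batch_dict[1] = remaining_bay_area
--     batch_dict[2] = remaining
--
--     return batch_dict
-- ===== SOURCE B (Python) =====
-- def determine_batches(rt_names: list) -> dict:
--     large_operator_names = [
--         "LA Metro Bus",
--         "LA Metro Rail",
--         "AC Transit",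
--         "Muni"
--     ]
--
--     bay_area_names = [
--         "Bay Area 511"
--     ]
--
--     # One pass: classify each name once with mutually exclusive branches
--     # (large operators take priority over Bay Area, both over remaining).
--     batch_dict = {0: [], 1: [], 2: []}
--     for i in rt_names:
--         if any(name in i for name in large_operator_names):
--             batch_dict[0].append(i)
--         elif any(name in i for name in bay_area_names):
--             batch_dict[1].append(i)
--         else:
--             batch_dict[2].append(i)
--     return batch_dict
-- ===== Notes on version B (the rewrite author's own statement) =====
-- stated objective: simpler
-- what changed: Replaces three full scans of rt_names (with 'i not in matching' membership re-scans inside the later comprehensions) by one loop that classifies each name once into the right batch via mutually exclusive branches.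
import Mathlib
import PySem

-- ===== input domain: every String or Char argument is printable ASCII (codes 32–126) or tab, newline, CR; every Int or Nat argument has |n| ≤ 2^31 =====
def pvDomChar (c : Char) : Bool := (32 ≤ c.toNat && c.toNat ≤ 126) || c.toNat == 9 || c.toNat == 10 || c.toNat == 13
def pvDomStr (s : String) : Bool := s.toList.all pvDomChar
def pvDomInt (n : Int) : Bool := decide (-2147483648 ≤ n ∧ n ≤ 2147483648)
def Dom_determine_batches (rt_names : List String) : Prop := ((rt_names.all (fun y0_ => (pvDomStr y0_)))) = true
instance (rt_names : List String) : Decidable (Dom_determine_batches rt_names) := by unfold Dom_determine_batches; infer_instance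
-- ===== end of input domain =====

-- B replaces A's three scans (plus membership re-scans) with one classifying pass; objective: simpler.


-- ===== PORT A =====
def dbLargeNames : List String := ["LA Metro Bus", "LA Metro Rail", "AC Transit", "Muni"]
def dbBayNames : List String := ["Bay Area 511"]

-- helper for "any(name in i for name in <names>)" used by both ports
def dbP (i : String) : Bool := dbLargeNames.any (fun name => PySem.Str.isIn name i)
def dbQ (i : String) : Bool := dbBayNames.any (fun name => PySem.Str.isIn name i)

def dbMatching (rt_names : List String) : List String :=
  rt_names.filter (fun i => dbP i)

def dbRemainingBay (rt_names : List String) : List String :=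
  rt_names.filter (fun i => dbQ i && !((dbMatching rt_names).contains i))

def dbRemaining (rt_names : List String) : List String :=
  rt_names.filter (fun i => !((dbMatching rt_names).contains i) && !((dbRemainingBay rt_names).contains i))

def determine_batches (rt_names : List String) : List (Int × List String) :=
  ((((PySem.Dict.empty).insert (0 : Int) (dbMatching rt_names)).insert 1
      (dbRemainingBay rt_names)).insert 2 (dbRemaining rt_names)).items

-- ===== PORT B =====
def dbStep (d : PySem.Dict Int (List String)) (i : String) : PySem.Dict Int (List String) :=
  if dbP i then d.modify 0 [] (fun l => l ++ [i])
  else if dbQ i then d.modify 1 [] (fun l => l ++ [i])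
  else d.modify 2 [] (fun l => l ++ [i])

def determine_batches_alt (rt_names : List String) : List (Int × List String) :=
  (rt_names.foldl dbStep
    (((PySem.Dict.empty.insert (0 : Int) []).insert 1 []).insert 2 [])).items

-- ===== PRECONDITION & SPEC =====
def Spec_determine_batches (rt_names : List String) (out : List (Int × List String)) : Prop := out = determine_batches_alt rt_names
instance (rt_names : List String) (out : List (Int × List String)) : Decidable (Spec_determine_batches rt_names out) := by unfold Spec_determine_batches; infer_instance

-- ===== CLAIM (what is proved, stated in full; the proofs are below) =====
def Claim_equal_determine_batches : Prop := ∀ (rt_names : List String), Dom_determine_batches rt_names → Spec_determine_batches rt_names (determine_batches rt_names)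

-- ===== LEMMAS AND PROOFS =====

-- the one-pass fold with a 3-key literal dict accumulates the three filters
lemma db_fold_inv (xs : List String) (a b c : List String) :
    xs.foldl dbStep (PySem.Dict.mk [((0 : Int), a), (1, b), (2, c)]) =
    PySem.Dict.mk [((0 : Int), a ++ xs.filter (fun i => dbP i)),
                   (1, b ++ xs.filter (fun i => dbQ i && !(dbP i))),
                   (2, c ++ xs.filter (fun i => !(dbP i) && !(dbQ i)))] := by
  induction xs generalizing a b c with
  | nil => simp
  | cons x xs ih =>
    cases hp : dbP x with
    | true =>
      simpa [List.foldl_cons, dbStep, hp, PySem.Dict.modify, PySem.Dict.insert,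
        PySem.Dict.getD, PySem.Dict.get?, PySem.Dict.contains, PySem.Dict.items,
        List.filter_cons, List.append_assoc] using ih (a ++ [x]) b c
    | false =>
      cases hq : dbQ x with
      | true =>
        simpa [List.foldl_cons, dbStep, hp, hq, PySem.Dict.modify, PySem.Dict.insert,
          PySem.Dict.getD, PySem.Dict.get?, PySem.Dict.contains, PySem.Dict.items,
          List.filter_cons, List.append_assoc] using ih a (b ++ [x]) c
      | false =>
        simpa [List.foldl_cons, dbStep, hp, hq, PySem.Dict.modify, PySem.Dict.insert,
          PySem.Dict.getD, PySem.Dict.get?, PySem.Dict.contains, PySem.Dict.items,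
          List.filter_cons, List.append_assoc] using ih a b (c ++ [x])

-- membership in a filter of the source list is just the predicate
lemma db_mem_filter_iff (xs : List String) (p : String → Bool) (i : String) (hi : i ∈ xs) :
    (xs.filter p).contains i = p i := by
  rcases h : p i with _ | _
  · simp [List.mem_filter, h]
  · simp [List.mem_filter, h, hi]

lemma db_bay_eq (rt_names : List String) :
    dbRemainingBay rt_names = rt_names.filter (fun i => dbQ i && !(dbP i)) := by
  unfold dbRemainingBay dbMatching
  apply List.filter_congr
  intro i hi
  rw [db_mem_filter_iff rt_names _ i hi]

lemma db_rem_eq (rt_names : List String) :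
    dbRemaining rt_names = rt_names.filter (fun i => !(dbP i) && !(dbQ i)) := by
  unfold dbRemaining
  apply List.filter_congr
  intro i hi
  rw [db_bay_eq]
  unfold dbMatching
  rw [db_mem_filter_iff rt_names _ i hi, db_mem_filter_iff rt_names _ i hi]
  cases dbP i <;> cases dbQ i <;> rfl

-- ===== VERDICT (by name: the statement is the Claim_ definition above) =====
theorem determine_batches_spec : Claim_equal_determine_batches := by
  intro rt_names _
  unfold Spec_determine_batches determine_batches determine_batches_alt
  rw [show (((PySem.Dict.empty.insert (0 : Int) ([] : List String)).insert 1 []).insert 2 [])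
        = PySem.Dict.mk [((0 : Int), ([] : List String)), (1, []), (2, [])] from rfl,
      db_fold_inv, db_bay_eq, db_rem_eq]
  rfl
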